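-- pv_equiv track=rewrite | github.com/mfroment/advent_of_code | y_2022/d_15.py | solve_1_interval_merge
-- ===== SOURCE A (Python) =====
-- def md(x, y, xx, yy):
--     return abs(x - xx) + abs(y - yy)
--
-- def covered_hrange(sx, sy, bx, by, ty):
--     d = md(sx, sy, bx, by)
--     if 0 <= abs(sy - ty) <= d:
--         dd = d - abs(sy - ty)
--         return [sx - dd, sx + dd]
--     return []
--
-- def union_many_intervals(intervals):
--     if len(intervals) == 0 or len(intervals) == 1:
--         return intervals
--     intervals = sorted([interval for interval in intervals if len(interval) > 0])
--     intervals.sort(key=lambda x: x[0])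
--     res = [intervals[0]]
--     for interval in intervals[1:]:
--         if interval[0] <= res[-1][1]:
--             res[-1][1] = max(res[-1][1], interval[1])
--         else:
--             res.append(interval)
--     return res
--
-- def solve_1_interval_merge(values, ty):
--     covered = []
--     beacons = set()
--     for sx, sy, bx, by in values:
--         covered.append(covered_hrange(sx, sy, bx, by, ty))
--         # mark possible beacons on the boundary of a given interval, not to be counted
--         if by == ty:
--             beacons.add(bx)
--     merged_covered = union_many_intervals(covered)
--     excluded_count = -len(beacons)
--     for interval in merged_covered:
--         excluded_count += interval[1] - interval[0] + 1
--     return excluded_count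
-- ===== SOURCE B (Python) =====
-- def solve_1_interval_merge(values, ty):
--     # Event sweep: emit (lo, +1) and (hi+1, -1) for each sensor's coverage of row ty,
--     # sort the events, and scan an active counter, adding a block's length each time
--     # the counter returns to zero.  No interval list is ever merged.
--     events = []
--     beacons = set()
--     for sx, sy, bx, by in values:
--         dd = abs(sx - bx) + abs(sy - by) - abs(sy - ty)
--         if dd >= 0:
--             events.append((sx - dd, 1))
--             events.append((sx + dd + 1, -1))
--         if by == ty:
--             beacons.add(bx)
--     events.sort()
--     active = 0
--     start = 0
--     total = 0
--     for x, d in events: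
--         if active == 0:
--             start = x
--         active += d
--         if active == 0:
--             total += x - start
--     return total - len(beacons)
-- ===== Notes on version B (the rewrite author's own statement) =====
-- stated objective: alternative
-- what changed: A filters and double-sorts per-sensor [lo,hi] intervals, merges overlapping ones into a new merged-interval list and sums its lengths; B never merges intervals: it emits boundary events (lo,+1) and (hi+1,-1), sorts the events once, and scans an active counter, adding a covered-block length each time the counter returns to zero.
import Mathlib
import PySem

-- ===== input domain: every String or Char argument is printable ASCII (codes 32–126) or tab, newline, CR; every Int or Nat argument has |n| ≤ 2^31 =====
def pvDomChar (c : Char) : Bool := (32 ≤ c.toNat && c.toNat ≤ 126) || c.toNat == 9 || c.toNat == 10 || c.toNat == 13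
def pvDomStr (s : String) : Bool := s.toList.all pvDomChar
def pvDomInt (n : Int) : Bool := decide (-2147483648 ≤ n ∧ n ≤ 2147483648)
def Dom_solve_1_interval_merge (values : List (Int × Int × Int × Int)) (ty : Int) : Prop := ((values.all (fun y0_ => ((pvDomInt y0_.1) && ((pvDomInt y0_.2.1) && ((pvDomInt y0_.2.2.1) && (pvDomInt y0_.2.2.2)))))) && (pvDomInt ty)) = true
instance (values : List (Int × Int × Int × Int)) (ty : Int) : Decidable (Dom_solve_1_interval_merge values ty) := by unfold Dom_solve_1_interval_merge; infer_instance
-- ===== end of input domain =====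

-- B replaces A's filter + double sort + merged-interval list + length summation by a boundary-event
-- sweep: sorted (lo,+1)/(hi+1,-1) events scanned with an active counter (same cost class).


-- ===== PORT A =====
def md (x y xx yy : Int) : Int := |x - xx| + |y - yy|

def covered_hrange (sx sy bx by_ ty : Int) : List Int :=
  let d := md sx sy bx by_
  if 0 ≤ |sy - ty| ∧ |sy - ty| ≤ d then
    let dd := d - |sy - ty|
    [sx - dd, sx + dd]
  else []

-- inner indexing uses pyGetD/pySetD with defaults: on every list this function actually
-- receives from solve_1_interval_merge the intervals are [] (filtered out) or [lo,hi],
-- so the indices 0, 1, -1 are in range exactly as in the Python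
def union_many_intervals (intervals : List (List Int)) : List (List Int) :=
  if intervals.length = 0 ∨ intervals.length = 1 then intervals
  else
    let intervals1 := PySem.List.sorted (intervals.filter (fun iv => decide (0 < iv.length))) (fun x => x) false
    let intervals2 := PySem.List.sorted intervals1 (fun x => PySem.List.pyGetD x 0 0) false
    match intervals2 with
    | [] => []   -- Python raises IndexError at 'intervals[0]' here; excluded by Pre_
    | first :: rest =>
      rest.foldl (fun res iv =>
        if PySem.List.pyGetD iv 0 0 ≤ PySem.List.pyGetD (PySem.List.pyGetD res (-1) []) 1 0 then
          res.dropLast ++ [PySem.List.pySetD (PySem.List.pyGetD res (-1) []) 1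
            (max (PySem.List.pyGetD (PySem.List.pyGetD res (-1) []) 1 0) (PySem.List.pyGetD iv 1 0))]
        else res ++ [iv]) [first]

def solve_1_interval_merge (values : List (Int × Int × Int × Int)) (ty : Int) : Int :=
  let st := values.foldl (fun (acc : List (List Int) × PySem.Set Int) v =>
      (acc.1 ++ [covered_hrange v.1 v.2.1 v.2.2.1 v.2.2.2 ty],
       if v.2.2.2 = ty then PySem.Set.add acc.2 v.2.2.1 else acc.2)) ([], [])
  let merged := union_many_intervals st.1
  -- Python indexes interval[1]/interval[0]; under Pre_ every merged interval is [lo,hi]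
  merged.foldl (fun ec iv => ec + (PySem.List.pyGetD iv 1 0 - PySem.List.pyGetD iv 0 0 + 1))
    (-(st.2.length : Int))

-- ===== PORT B =====
def solve_1_interval_merge_alt (values : List (Int × Int × Int × Int)) (ty : Int) : Int :=
  let st := values.foldl (fun (acc : List (Int × Int) × PySem.Set Int) v =>
      let dd := |v.1 - v.2.2.1| + |v.2.1 - v.2.2.2| - |v.2.1 - ty|
      ((if 0 ≤ dd then acc.1 ++ [(v.1 - dd, 1), (v.1 + dd + 1, -1)] else acc.1),
       if v.2.2.2 = ty then PySem.Set.add acc.2 v.2.2.1 else acc.2)) ([], [])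
  let evs := PySem.List.sorted2 st.1 (fun e => e.1) (fun e => e.2) false
  let fin := evs.foldl (fun (ast : Int × Int × Int) e =>
      let s := if ast.1 = 0 then e.1 else ast.2.1
      let a := ast.1 + e.2
      (a, s, if a = 0 then ast.2.2 + (e.1 - s) else ast.2.2)) ((0 : Int), (0 : Int), (0 : Int))
  fin.2.2 - (st.2.length : Int)

-- ===== PRECONDITION & SPEC =====
-- Pre_ excludes exactly the inputs where A raises IndexError: a nonempty values list in which
-- every sensor's coverage misses row ty (every coverage interval is empty).
def Pre_solve_1_interval_merge (values : List (Int × Int × Int × Int)) (ty : Int) : Prop :=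
  values = [] ∨ ∃ v ∈ values, |v.2.1 - ty| ≤ |v.1 - v.2.2.1| + |v.2.1 - v.2.2.2|
instance (values : List (Int × Int × Int × Int)) (ty : Int) : Decidable (Pre_solve_1_interval_merge values ty) := by unfold Pre_solve_1_interval_merge; infer_instance

def pvWitness_solve_1_interval_merge : (List (Int × Int × Int × Int)) × Int := ([(0, 0, 0, 0)], 0)

def Spec_solve_1_interval_merge (values : List (Int × Int × Int × Int)) (ty : Int) (out : Int) : Prop := out = solve_1_interval_merge_alt values ty
instance (values : List (Int × Int × Int × Int)) (ty : Int) (out : Int) : Decidable (Spec_solve_1_interval_merge values ty out) := by unfold Spec_solve_1_interval_merge; infer_instance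

-- ===== CLAIM (what is proved, stated in full; the proofs are below) =====
def Claim_equal_solve_1_interval_merge : Prop := ∀ (values : List (Int × Int × Int × Int)) (ty : Int), Dom_solve_1_interval_merge values ty → Pre_solve_1_interval_merge values ty → Spec_solve_1_interval_merge values ty (solve_1_interval_merge values ty)

-- ===== LEMMAS AND PROOFS =====

-- the span of one sensor line on row ty, as an optional pair (none = empty interval)
def pvSpan (ty : Int) (v : Int × Int × Int × Int) : Option (Int × Int) :=
  let dd := |v.1 - v.2.2.1| + |v.2.1 - v.2.2.2| - |v.2.1 - ty|
  if 0 ≤ dd then some (v.1 - dd, v.1 + dd) else none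

def pvToL (p : Int × Int) : List Int := [p.1, p.2]

def pvHr (ty : Int) (v : Int × Int × Int × Int) : List Int :=
  covered_hrange v.1 v.2.1 v.2.2.1 v.2.2.2 ty

def pvBStep (ty : Int) (s : PySem.Set Int) (v : Int × Int × Int × Int) : PySem.Set Int :=
  if v.2.2.2 = ty then PySem.Set.add s v.2.2.1 else s

def pvLen (iv : List Int) : Int := PySem.List.pyGetD iv 1 0 - PySem.List.pyGetD iv 0 0 + 1

def pvFStep (rt : Int × Int) (p : Int × Int) : Int × Int :=
  (max rt.1 (p.2 + 1), rt.2 + max 0 (p.2 + 1 - max p.1 rt.1))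

def pvMStep (res : List (List Int)) (iv : List Int) : List (List Int) :=
  if PySem.List.pyGetD iv 0 0 ≤ PySem.List.pyGetD (PySem.List.pyGetD res (-1) []) 1 0 then
    res.dropLast ++ [PySem.List.pySetD (PySem.List.pyGetD res (-1) []) 1
      (max (PySem.List.pyGetD (PySem.List.pyGetD res (-1) []) 1 0) (PySem.List.pyGetD iv 1 0))]
  else res ++ [iv]

-- B's boundary events of one span, and the sweep step
def pvEv (p : Int × Int) : List (Int × Int) := [(p.1, 1), (p.2 + 1, -1)]

def pvStep (ast : Int × Int × Int) (e : Int × Int) : Int × Int × Int :=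
  let s := if ast.1 = 0 then e.1 else ast.2.1
  let a := ast.1 + e.2
  (a, s, if a = 0 then ast.2.2 + (e.1 - s) else ast.2.2)

-- the covered set of a span list, as a Finset
noncomputable def pvCov (l : List (Int × Int)) : Finset Int :=
  l.foldr (fun p s => Finset.Icc p.1 p.2 ∪ s) ∅

-- running delta-sum of the events with coordinate ≤ y
def pvPsum (E : List (Int × Int)) (y : Int) : Int :=
  ((E.filter (fun e => decide (e.1 ≤ y))).map Prod.snd).sum

-- lexicographic order on event pairs (Python tuple comparison)
def pvLexR (a b : Int × Int) : Prop := a.1 < b.1 ∨ (a.1 = b.1 ∧ a.2 ≤ b.2)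

-- the balance condition: up to any coordinate, closings never outnumber earlier openings
def pvK (E : List (Int × Int)) (a : Int) : Prop :=
  ∀ y : Int, ((E.countP (fun e => decide (e.1 ≤ y) && decide (e.2 = -1))) : Int)
      ≤ a + ((E.countP (fun e => decide (e.1 ≤ y - 1) && decide (e.2 = 1))) : Int)

@[simp] lemma pvGet0 (a b : Int) : PySem.List.pyGetD [a, b] 0 0 = a := by
  simp [PySem.List.pyGetD, PySem.List.pyGet?, PySem.List.pyIdx?]

@[simp] lemma pvGet1 (a b : Int) : PySem.List.pyGetD [a, b] 1 0 = b := by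
  simp [PySem.List.pyGetD, PySem.List.pyGet?, PySem.List.pyIdx?]

@[simp] lemma pvSet1 (a b v : Int) : PySem.List.pySetD [a, b] 1 v = [a, v] := by
  simp [PySem.List.pySetD, PySem.List.pySet?, PySem.List.pyIdx?]

@[simp] lemma pvLen_pair (a b : Int) : pvLen [a, b] = b - a + 1 := by simp [pvLen]

@[simp] lemma pvCov_nil : pvCov [] = ∅ := rfl

@[simp] lemma pvCov_cons (p : Int × Int) (l : List (Int × Int)) :
    pvCov (p :: l) = Finset.Icc p.1 p.2 ∪ pvCov l := rfl

lemma pvCov_mem (l : List (Int × Int)) (y : Int) :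
    y ∈ pvCov l ↔ ∃ p ∈ l, p.1 ≤ y ∧ y ≤ p.2 := by
  induction l with
  | nil => simp
  | cons p l ih => simp [ih, Finset.mem_Icc]

lemma pvCov_perm (l₁ l₂ : List (Int × Int)) (h : l₁.Perm l₂) : pvCov l₁ = pvCov l₂ := by
  ext y
  simp only [pvCov_mem]
  constructor
  · rintro ⟨p, hp, h1⟩; exact ⟨p, h.mem_iff.mp hp, h1⟩
  · rintro ⟨p, hp, h1⟩; exact ⟨p, h.mem_iff.mpr hp, h1⟩

lemma pvHr_eq (ty : Int) (v : Int × Int × Int × Int) :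
    pvHr ty v = (pvSpan ty v).elim [] pvToL := by
  rcases v with ⟨sx, sy, bx, by_⟩
  simp only [pvHr, pvSpan, covered_hrange, md]
  have h0 : 0 ≤ |sy - ty| := abs_nonneg _
  by_cases h : |sy - ty| ≤ |sx - bx| + |sy - by_|
  · rw [if_pos ⟨h0, h⟩, if_pos (by omega)]; rfl
  · rw [if_neg (by omega), if_neg (by omega)]; rfl

-- A's loop splits into the covered list and the beacon set
lemma pvFoldA (ty : Int) (values : List (Int × Int × Int × Int)) :
    ∀ (c : List (List Int)) (s : PySem.Set Int),
    values.foldl (fun (acc : List (List Int) × PySem.Set Int) v =>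
      (acc.1 ++ [covered_hrange v.1 v.2.1 v.2.2.1 v.2.2.2 ty],
       if v.2.2.2 = ty then PySem.Set.add acc.2 v.2.2.1 else acc.2)) (c, s)
      = (c ++ values.map (pvHr ty), values.foldl (pvBStep ty) s) := by
  induction values with
  | nil => intro c s; simp
  | cons v vs ih =>
      intro c s
      simp only [List.foldl_cons, List.map_cons]
      rw [ih]
      simp [pvHr, pvBStep, List.append_assoc]

-- B's loop splits into the event list and the beacon set
lemma pvFoldB (ty : Int) (values : List (Int × Int × Int × Int)) :
    ∀ (sp : List (Int × Int)) (s : PySem.Set Int),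
    values.foldl (fun (acc : List (Int × Int) × PySem.Set Int) v =>
      let dd := |v.1 - v.2.2.1| + |v.2.1 - v.2.2.2| - |v.2.1 - ty|
      ((if 0 ≤ dd then acc.1 ++ [(v.1 - dd, 1), (v.1 + dd + 1, -1)] else acc.1),
       if v.2.2.2 = ty then PySem.Set.add acc.2 v.2.2.1 else acc.2)) (sp, s)
      = (sp ++ (values.filterMap (pvSpan ty)).flatMap pvEv, values.foldl (pvBStep ty) s) := by
  induction values with
  | nil => intro sp s; simp
  | cons v vs ih =>
      intro sp s
      simp only [List.foldl_cons, List.filterMap_cons]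
      rw [ih]
      simp only [pvSpan, pvBStep]
      by_cases h : 0 ≤ |v.1 - v.2.2.1| + |v.2.1 - v.2.2.2| - |v.2.1 - ty|
      · have h' : |v.2.1 - ty| ≤ |v.1 - v.2.2.1| + |v.2.1 - v.2.2.2| := by omega
        simp [h, h', pvEv, List.append_assoc]
      · have h' : ¬ |v.2.1 - ty| ≤ |v.1 - v.2.2.1| + |v.2.1 - v.2.2.2| := by omega
        simp [h, h']

lemma pvFilterMapEq (ty : Int) (values : List (Int × Int × Int × Int)) :
    (values.map (pvHr ty)).filter (fun iv => decide (0 < iv.length))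
      = (values.filterMap (pvSpan ty)).map pvToL := by
  induction values with
  | nil => rfl
  | cons v vs ih =>
      simp only [List.map_cons, List.filter_cons, List.filterMap_cons, pvHr_eq ty v]
      cases h : pvSpan ty v with
      | none => simpa using ih
      | some p => simp [pvToL, ih]

-- Python's list comparison on two-element lists is sorted2's lexicographic test
lemma pvCmp (p q : Int × Int) :
    decide (pvToL p < pvToL q)
      = (decide (p.1 < q.1) || (!decide (q.1 < p.1) && decide (p.2 < q.2))) := by
  rcases p with ⟨a, b⟩; rcases q with ⟨c, d⟩
  simp only [pvToL]
  by_cases h1 : a < c <;> by_cases h2 : c < a <;> by_cases h3 : b < d <;>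
    simp [List.cons_lt_cons_iff, h1, h2, h3] <;> omega

lemma pvInsertBy_map (p : Int × Int) (qs : List (Int × Int)) :
    PySem.List.insertBy (fun a b => decide (a < b)) (pvToL p) (qs.map pvToL)
      = (PySem.List.insertBy
          (fun a b => decide (a.1 < b.1) || (!decide (b.1 < a.1) && decide (a.2 < b.2)))
          p qs).map pvToL := by
  induction qs with
  | nil => simp [PySem.List.insertBy]
  | cons q qs ih =>
      simp only [List.map_cons, PySem.List.insertBy]
      rw [pvCmp p q]
      by_cases h : (decide (p.1 < q.1) || (!decide (q.1 < p.1) && decide (p.2 < q.2))) = true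
      · simp [h]
      · simp only [Bool.not_eq_true] at h
        simp [h, ih]

-- sorting the 2-element lists lexicographically = sorting the pairs and mapping
lemma pvSorted_map (ps : List (Int × Int)) :
    PySem.List.sorted (ps.map pvToL) (fun x => x) false
      = (PySem.List.sorted2 ps (fun p => p.1) (fun p => p.2) false).map pvToL := by
  simp only [PySem.List.sorted, PySem.List.sorted2]
  have key : ∀ (l : List (Int × Int)) (acc : List (Int × Int)),
      (l.map pvToL).foldl
        (fun acc x => PySem.List.insertBy (fun a b => decide (a < b)) x acc) (acc.map pvToL)
      = (l.foldl (fun acc x => PySem.List.insertBy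
          (fun a b => decide (a.1 < b.1) || (!decide (b.1 < a.1) && decide (a.2 < b.2))) x acc)
          acc).map pvToL := by
    intro l
    induction l with
    | nil => intro acc; rfl
    | cons p l ih =>
        intro acc
        simp only [List.map_cons, List.foldl_cons]
        rw [pvInsertBy_map, ih]
  simpa using key ps []

lemma pvInsertBy_pairwise_lex (p : Int × Int) (l : List (Int × Int))
    (hl : l.Pairwise pvLexR) :
    (PySem.List.insertBy
        (fun a b => decide (a.1 < b.1) || (!decide (b.1 < a.1) && decide (a.2 < b.2)))
        p l).Pairwise pvLexR := by
  induction l with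
  | nil => simp [PySem.List.insertBy, pvLexR]
  | cons q l ih =>
      rw [List.pairwise_cons] at hl
      simp only [PySem.List.insertBy]
      by_cases h : (decide (p.1 < q.1) || (!decide (q.1 < p.1) && decide (p.2 < q.2))) = true
      · rw [if_pos h]
        simp only [Bool.or_eq_true, decide_eq_true_eq, Bool.and_eq_true, Bool.not_eq_true',
          decide_eq_false_iff_not] at h
        have hpq : pvLexR p q := by unfold pvLexR; rcases h with h | ⟨h, h'⟩ <;> omega
        refine List.Pairwise.cons ?_ (List.Pairwise.cons hl.1 hl.2)
        intro x hx
        rcases List.mem_cons.mp hx with rfl | hx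
        · exact hpq
        · have := hl.1 x hx; unfold pvLexR at *; omega
      · rw [if_neg h]
        simp only [Bool.or_eq_true, decide_eq_true_eq, Bool.and_eq_true, Bool.not_eq_true',
          decide_eq_false_iff_not, not_or, not_and] at h
        have hqp : pvLexR q p := by unfold pvLexR; omega
        refine List.Pairwise.cons ?_ (ih hl.2)
        intro x hx
        rw [PySem.List.mem_insertBy] at hx
        rcases hx with rfl | hx
        · exact hqp
        · exact hl.1 x hx

lemma pvSorted2_pairwise_lex (ps : List (Int × Int)) :
    (PySem.List.sorted2 ps (fun p => p.1) (fun p => p.2) false).Pairwise pvLexR := by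
  simp only [PySem.List.sorted2]
  have key : ∀ (l acc : List (Int × Int)), acc.Pairwise pvLexR →
      (l.foldl (fun acc x => PySem.List.insertBy
          (fun a b => decide (a.1 < b.1) || (!decide (b.1 < a.1) && decide (a.2 < b.2))) x acc)
        acc).Pairwise pvLexR := by
    intro l
    induction l with
    | nil => intro acc h; exact h
    | cons p l ih =>
        intro acc h
        exact ih _ (pvInsertBy_pairwise_lex p acc h)
  simpa using key ps [] (by simp)

lemma pvSorted2_pairwise_fst (ps : List (Int × Int)) :
    (PySem.List.sorted2 ps (fun p => p.1) (fun p => p.2) false).Pairwise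
      (fun p q => p.1 ≤ q.1) := by
  refine (pvSorted2_pairwise_lex ps).imp ?_
  intro p q h
  unfold pvLexR at h; omega

lemma pvSecondSort (ps : List (Int × Int)) :
    PySem.List.sorted
      ((PySem.List.sorted2 ps (fun p => p.1) (fun p => p.2) false).map pvToL)
      (fun x => PySem.List.pyGetD x 0 0) false
      = (PySem.List.sorted2 ps (fun p => p.1) (fun p => p.2) false).map pvToL := by
  apply PySem.List.sorted_eq_self_of_pairwise
  rw [List.pairwise_map]
  refine (pvSorted2_pairwise_fst ps).imp ?_
  intro p q h
  simpa [pvToL] using h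

lemma pvShift (qs : List (Int × Int)) :
    ∀ r t, (qs.foldl pvFStep (r, t)).2 = t + (qs.foldl pvFStep (r, 0)).2 := by
  induction qs with
  | nil => intro r t; simp
  | cons p qs ih =>
      intro r t
      simp only [List.foldl_cons, pvFStep]
      rw [ih, ih (max r (p.2 + 1)) (0 + max 0 (p.2 + 1 - max p.1 r))]
      omega

lemma pvMergeSum (qs : List (Int × Int)) :
    ∀ (front : List (List Int)) (cl ch : Int), (∀ p ∈ qs, p.1 ≤ p.2) →
    (((qs.map pvToL).foldl pvMStep (front ++ [[cl, ch]])).map pvLen).sum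
      = ((front.map pvLen).sum + (ch + 1 - cl)) + (qs.foldl pvFStep (ch + 1, 0)).2 := by
  induction qs with
  | nil => intro front cl ch _; simp; omega
  | cons p qs ih =>
      intro front cl ch h
      have hp : p.1 ≤ p.2 := h p (by simp)
      have hq : ∀ x ∈ qs, x.1 ≤ x.2 := fun x hx => h x (by simp [hx])
      simp only [List.map_cons, List.foldl_cons]
      have hlast : PySem.List.pyGetD (front ++ [[cl, ch]]) (-1) [] = [cl, ch] :=
        PySem.List.pyGetD_neg_one_append_singleton _ _ _
      by_cases hle : p.1 ≤ ch
      · have hstep : pvMStep (front ++ [[cl, ch]]) (pvToL p)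
            = front ++ [[cl, max ch p.2]] := by
          simp [pvMStep, hlast, pvToL, hle]
        rw [hstep, ih front cl (max ch p.2) hq]
        have hini : pvFStep (ch + 1, 0) p = (max ch p.2 + 1, max ch p.2 - ch) := by
          simp only [pvFStep, Prod.mk.injEq]
          omega
        rw [hini, pvShift qs (max ch p.2 + 1) (max ch p.2 - ch)]
        omega
      · have hstep : pvMStep (front ++ [[cl, ch]]) (pvToL p)
            = (front ++ [[cl, ch]]) ++ [[p.1, p.2]] := by
          simp [pvMStep, hlast, pvToL, hle]
        rw [hstep, ih (front ++ [[cl, ch]]) p.1 p.2 hq]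
        have hini : pvFStep (ch + 1, 0) p = (p.2 + 1, p.2 + 1 - p.1) := by
          simp only [pvFStep, Prod.mk.injEq]
          omega
        rw [hini, pvShift qs (p.2 + 1) (p.2 + 1 - p.1)]
        simp only [List.map_append, List.sum_append, List.map_cons, List.map_nil, pvLen_pair,
          List.sum_cons, List.sum_nil]
        omega

lemma pvSpanNonempty (ty : Int) (v : Int × Int × Int × Int) (p : Int × Int)
    (h : pvSpan ty v = some p) : p.1 ≤ p.2 := by
  simp only [pvSpan] at h
  split at h
  · rename_i hdd
    cases h
    simp only
    omega
  · cases h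

lemma pvUnion_ge2 (l : List (List Int)) (h : ¬(l.length = 0 ∨ l.length = 1)) :
    union_many_intervals l =
      match PySem.List.sorted
          (PySem.List.sorted (l.filter fun iv => decide (0 < iv.length)) (fun x => x) false)
          (fun x => PySem.List.pyGetD x 0 0) false with
      | [] => []
      | first :: rest => rest.foldl pvMStep [first] := by
  rw [union_many_intervals, if_neg h]
  rfl

lemma pvSumFold (merged : List (List Int)) (a : Int) :
    merged.foldl (fun ec iv => ec + (PySem.List.pyGetD iv 1 0 - PySem.List.pyGetD iv 0 0 + 1)) a
      = a + (merged.map pvLen).sum := by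
  rw [show (fun ec iv => ec + (PySem.List.pyGetD iv 1 0 - PySem.List.pyGetD iv 0 0 + 1))
        = (fun (ec : Int) iv => ec + pvLen iv) from rfl]
  exact PySem.List.foldl_add merged pvLen a

-- ---- frontier fold (A's merged sum) = covered cardinality ----

lemma pvFrontier (l : List (Int × Int)) :
    ∀ (reach t : Int) (C : Finset Int),
    (∀ p ∈ l, p.1 ≤ p.2) → l.Pairwise (fun p q => p.1 ≤ q.1) →
    (∀ p ∈ l, ∀ y, p.1 ≤ y → y < reach → y ∈ C) →
    (∀ y ∈ C, y < reach) →
    (l.foldl pvFStep (reach, t)).2 = t + ((pvCov l \ C).card : Int) := by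
  induction l with
  | nil => intro reach t C _ _ _ _; simp
  | cons p l ih =>
      intro reach t C hle hpair hcov hub
      have hp : p.1 ≤ p.2 := hle p (by simp)
      rw [List.pairwise_cons] at hpair
      simp only [List.foldl_cons, pvFStep]
      have hsd : Finset.Icc p.1 p.2 \ C = Finset.Icc (max p.1 reach) p.2 := by
        ext y
        simp only [Finset.mem_sdiff, Finset.mem_Icc]
        constructor
        · rintro ⟨⟨h1, h2⟩, hnc⟩
          refine ⟨?_, h2⟩
          by_contra hy
          push_neg at hy
          exact hnc (hcov p (by simp) y h1 (by omega))
        · rintro ⟨h1, h2⟩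
          exact ⟨⟨by omega, h2⟩, fun hc => by have := hub y hc; omega⟩
      have hsplit : pvCov (p :: l) \ C
          = (Finset.Icc p.1 p.2 \ C) ∪ (pvCov l \ (C ∪ Finset.Icc p.1 p.2)) := by
        ext y
        simp only [pvCov_cons, Finset.mem_sdiff, Finset.mem_union]
        tauto
      have hdisj : Disjoint (Finset.Icc p.1 p.2 \ C)
          (pvCov l \ (C ∪ Finset.Icc p.1 p.2)) := by
        rw [Finset.disjoint_left]
        intro y hy1 hy2
        simp only [Finset.mem_sdiff, Finset.mem_union] at hy1 hy2
        exact hy2.2 (Or.inr hy1.1)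
      rw [ih (max reach (p.2 + 1)) (t + max 0 (p.2 + 1 - max p.1 reach))
            (C ∪ Finset.Icc p.1 p.2) (fun q hq => hle q (by simp [hq])) hpair.2
            ?_ ?_]
      · rw [hsplit, Finset.card_union_of_disjoint hdisj, hsd]
        have hc1 : ((Finset.Icc (max p.1 reach) p.2).card : Int)
            = max 0 (p.2 + 1 - max p.1 reach) := by
          rw [Int.card_Icc]
          omega
        push_cast
        omega
      · intro q hq y h1 h2
        simp only [Finset.mem_union, Finset.mem_Icc]
        by_cases hyr : y < reach
        · exact Or.inl (hcov q (by simp [hq]) y h1 hyr)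
        · right
          have := hpair.1 q hq
          constructor
          · omega
          · omega
      · intro y hy
        simp only [Finset.mem_union, Finset.mem_Icc] at hy
        rcases hy with hy | hy
        · have := hub y hy; omega
        · omega

lemma pvFrontCard (q : Int × Int) (qs : List (Int × Int))
    (hle : ∀ p ∈ q :: qs, p.1 ≤ p.2)
    (hpair : (q :: qs).Pairwise (fun p r => p.1 ≤ r.1)) :
    ((q :: qs).foldl pvFStep (q.1, 0)).2 = ((pvCov (q :: qs)).card : Int) := by
  have hmin : ∀ p ∈ q :: qs, q.1 ≤ p.1 := by
    intro p hp
    rcases List.mem_cons.mp hp with rfl | hp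
    · omega
    · exact (List.pairwise_cons.mp hpair).1 p hp
  rw [pvFrontier (q :: qs) q.1 0 ∅ hle hpair
      (fun p hp y h1 h2 => absurd (hmin p hp) (by omega)) (by simp)]
  simp

-- ---- the sweep = covered cardinality ----

lemma pvPsum_nil (y : Int) : pvPsum [] y = 0 := rfl

lemma pvPsum_cons (x d y : Int) (E : List (Int × Int)) :
    pvPsum ((x, d) :: E) y = (if x ≤ y then d else 0) + pvPsum E y := by
  simp only [pvPsum, List.filter_cons]
  by_cases h : x ≤ y <;> simp [h]

lemma pvPsum_zero_of_lt (E : List (Int × Int)) (c y : Int)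
    (hc : ∀ e ∈ E, c ≤ e.1) (hy : y < c) : pvPsum E y = 0 := by
  unfold pvPsum
  have : E.filter (fun e => decide (e.1 ≤ y)) = [] := by
    rw [List.filter_eq_nil_iff]
    intro e he
    have := hc e he
    simp only [decide_eq_true_eq]
    omega
  rw [this]
  rfl

lemma pvCountP_zero (E : List (Int × Int)) (q : Int × Int → Bool) (c y : Int)
    (hc : ∀ e ∈ E, c ≤ e.1) (hy : y < c) :
    E.countP (fun e => decide (e.1 ≤ y) && q e) = 0 := by
  rw [List.countP_eq_zero]
  intro e he
  have := hc e he
  simp only [Bool.and_eq_true, decide_eq_true_eq, not_and]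
  intro h
  omega

lemma pvCountP_zero' (E : List (Int × Int)) (q : Int × Int → Bool) (c : Int)
    (hc : ∀ e ∈ E, c ≤ e.1) :
    E.countP (fun e => decide (e.1 < c) && q e) = 0 := by
  rw [List.countP_eq_zero]
  intro e he
  have := hc e he
  simp only [Bool.and_eq_true, decide_eq_true_eq, not_and]
  intro h
  omega

lemma pvCntLe (E : List (Int × Int)) (y : Int) :
    E.countP (fun e => decide (e.1 ≤ y - 1) && decide (e.2 = 1))
      = E.countP (fun e => decide (e.1 < y) && decide (e.2 = 1)) := by
  apply List.countP_congr
  intro e _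
  have h1 : decide (e.1 ≤ y - 1) = decide (e.1 < y) := by
    apply decide_eq_decide.mpr; omega
  rw [h1]

lemma pvK_a_nonneg (E : List (Int × Int)) (a : Int)
    (hs : E.Pairwise pvLexR) (hK : pvK E a) : 0 ≤ a := by
  cases E with
  | nil =>
      have := hK 0
      simpa using this
  | cons e E =>
      have hc : ∀ f ∈ e :: E, e.1 ≤ f.1 := by
        intro f hf
        rcases List.mem_cons.mp hf with rfl | hf
        · omega
        · have := (List.pairwise_cons.mp hs).1 f hf
          unfold pvLexR at this; omega
      have := hK (e.1 - 1)
      rw [pvCountP_zero _ _ e.1 _ hc (by omega),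
          pvCountP_zero _ _ e.1 _ hc (by omega)] at this
      simpa using this

lemma pvK_head_neg (x a : Int) (E : List (Int × Int))
    (hs : ((x, -1) :: E).Pairwise pvLexR) (hK : pvK ((x, -1) :: E) a) : 1 ≤ a := by
  have hc : ∀ f ∈ E, x ≤ f.1 := by
    intro f hf
    have := (List.pairwise_cons.mp hs).1 f hf
    unfold pvLexR at this; omega
  have h := hK x
  simp [List.countP_cons] at h
  rw [pvCountP_zero' E (fun e => decide (e.2 = 1)) x hc] at h
  have h2 : (0 : Int) ≤ (E.countP (fun e => decide (e.1 ≤ x) && decide (e.2 = -1)) : Int) := by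
    positivity
  push_cast at h
  omega

lemma pvK_tail (x d a : Int) (E : List (Int × Int))
    (hs : ((x, d) :: E).Pairwise pvLexR) (hd : d = 1 ∨ d = -1)
    (hK : pvK ((x, d) :: E) a) : pvK E (a + d) := by
  intro y
  have h := hK y
  have hc : ∀ f ∈ E, x ≤ f.1 := by
    intro f hf
    have := (List.pairwise_cons.mp hs).1 f hf
    unfold pvLexR at this; omega
  rw [pvCntLe]
  rcases hd with rfl | rfl
  · simp [List.countP_cons] at h
    split_ifs at h <;> push_cast at h ⊢ <;> omega
  · simp [List.countP_cons] at h
    by_cases hxy : x ≤ y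
    · rw [if_pos hxy] at h
      push_cast at h ⊢
      omega
    · have ha1 : 1 ≤ a := pvK_head_neg x a E hs hK
      rw [pvCountP_zero E (fun e => decide (e.2 = -1)) x y hc (by omega)]
      have h2 : (0 : Int) ≤ (E.countP (fun e => decide (e.1 < y) && decide (e.2 = 1)) : Int) := by
        positivity
      push_cast
      omega

lemma pvSweep (E : List (Int × Int)) :
    ∀ (a s t L B : Int),
    E.Pairwise pvLexR →
    (∀ e ∈ E, e.2 = 1 ∨ e.2 = -1) →
    pvK E a →
    a + (E.map Prod.snd).sum = 0 →
    (∀ e ∈ E, L ≤ e.1) →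
    (∀ e ∈ E, e.1 ≤ B + 1) →
    (1 ≤ a → s = L) →
    (E.foldl pvStep (a, s, t)).2.2
      = t + (((Finset.Icc L B).filter (fun y => 1 ≤ a + pvPsum E y)).card : Int) := by
  induction E with
  | nil =>
      intro a s t L B _ _ _ hbal _ _ _
      simp only [List.map_nil, List.sum_nil, add_zero] at hbal
      subst hbal
      simp [pvPsum_nil]
  | cons e E ih =>
      rintro a s t L B hs hd hK hbal hL hB hsl
      obtain ⟨x, d⟩ := e
      have hxle : ∀ f ∈ E, x ≤ f.1 := by
        intro f hf
        have := (List.pairwise_cons.mp hs).1 f hf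
        unfold pvLexR at this; omega
      have ha0 : 0 ≤ a := pvK_a_nonneg _ a hs hK
      have hd0 : d = 1 ∨ d = -1 := hd (x, d) (by simp)
      have hLx : L ≤ x := hL (x, d) (by simp)
      have hxB : x ≤ B + 1 := hB (x, d) (by simp)
      have hK' : pvK E (a + d) := pvK_tail x d a E hs hd0 hK
      have hbal' : (a + d) + (E.map Prod.snd).sum = 0 := by
        simp only [List.map_cons, List.sum_cons] at hbal
        omega
      have hps0 : ∀ y : Int, y < x → pvPsum E y = 0 :=
        fun y hy => pvPsum_zero_of_lt E x y hxle hy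
      simp only [List.foldl_cons, pvStep]
      by_cases haz : a = 0
      · subst haz
        have hd1 : d = 1 := by
          rcases hd0 with rfl | rfl
          · rfl
          · exact absurd (pvK_head_neg x 0 E hs hK) (by omega)
        subst hd1
        simp only [if_pos rfl, zero_add, show (1 : Int) = 0 ↔ False by simp, if_neg one_ne_zero,
          if_true, if_false]
        rw [ih 1 x t x B (List.pairwise_cons.mp hs).2 (fun f hf => hd f (by simp [hf])) hK'
            hbal' hxle (fun f hf => hB f (by simp [hf])) (fun _ => rfl)]
        congr 2
        congr 1
        ext y
        simp only [Finset.mem_filter, Finset.mem_Icc, pvPsum_cons]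
        constructor
        · rintro ⟨⟨h1, h2⟩, hp⟩
          refine ⟨⟨by omega, h2⟩, ?_⟩
          rw [if_pos h1]
          omega
        · rintro ⟨⟨h1, h2⟩, hp⟩
          by_cases hxy : x ≤ y
          · rw [if_pos hxy] at hp
            exact ⟨⟨hxy, h2⟩, by omega⟩
          · rw [if_neg hxy, hps0 y (by omega)] at hp
            omega
      · have ha1 : 1 ≤ a := by omega
        have hsL : s = L := hsl ha1
        simp only [if_neg haz]
        rw [hsL]
        rcases hd0 with rfl | rfl
        · have hane : a + 1 ≠ 0 := by omega
          simp only [if_neg hane]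
          rw [ih (a + 1) L t L B (List.pairwise_cons.mp hs).2 (fun f hf => hd f (by simp [hf]))
              hK' hbal' (fun f hf => hL f (by simp [hf])) (fun f hf => hB f (by simp [hf]))
              (fun _ => rfl)]
          congr 2
          congr 1
          ext y
          simp only [Finset.mem_filter, Finset.mem_Icc, pvPsum_cons]
          constructor
          · rintro ⟨⟨h1, h2⟩, hp⟩
            refine ⟨⟨h1, h2⟩, ?_⟩
            by_cases hxy : x ≤ y
            · rw [if_pos hxy]
              omega
            · rw [if_neg hxy, hps0 y (by omega)]
              omega
          · rintro ⟨⟨h1, h2⟩, hp⟩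
            refine ⟨⟨h1, h2⟩, ?_⟩
            by_cases hxy : x ≤ y
            · rw [if_pos hxy] at hp
              omega
            · rw [hps0 y (by omega)]
              omega
        · by_cases ha1' : a = 1
          · subst ha1'
            simp only [show (1 : Int) + -1 = 0 from rfl, if_pos rfl, if_true, if_false]
            rw [ih 0 L (t + (x - L)) x B (List.pairwise_cons.mp hs).2
                (fun f hf => hd f (by simp [hf])) hK' hbal' hxle
                (fun f hf => hB f (by simp [hf])) (fun h => absurd h (by omega))]
            have hsplit : (Finset.Icc L B).filter (fun y => 1 ≤ 1 + pvPsum ((x, -1) :: E) y)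
                = Finset.Icc L (x - 1) ∪ (Finset.Icc x B).filter (fun y => 1 ≤ 0 + pvPsum E y) := by
              ext y
              simp only [Finset.mem_filter, Finset.mem_Icc, Finset.mem_union, pvPsum_cons]
              constructor
              · rintro ⟨⟨h1, h2⟩, hp⟩
                by_cases hxy : x ≤ y
                · right
                  rw [if_pos hxy] at hp
                  exact ⟨⟨hxy, h2⟩, by omega⟩
                · left
                  omega
              · rintro (⟨h1, h2⟩ | ⟨⟨h1, h2⟩, hp⟩)
                · refine ⟨⟨h1, by omega⟩, ?_⟩
                  rw [if_neg (by omega), hps0 y (by omega)]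
                  omega
                · refine ⟨⟨by omega, h2⟩, ?_⟩
                  rw [if_pos h1]
                  omega
            have hdisj : Disjoint (Finset.Icc L (x - 1))
                ((Finset.Icc x B).filter (fun y => 1 ≤ 0 + pvPsum E y)) := by
              rw [Finset.disjoint_left]
              intro y hy1 hy2
              simp only [Finset.mem_Icc] at hy1
              simp only [Finset.mem_filter, Finset.mem_Icc] at hy2
              omega
            rw [hsplit, Finset.card_union_of_disjoint hdisj]
            have hc1 : ((Finset.Icc L (x - 1)).card : Int) = x - L := by
              rw [Int.card_Icc]
              omega
            push_cast
            omega
          · have hane : a + -1 ≠ 0 := by omega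
            simp only [if_neg hane]
            rw [ih (a + -1) L t L B (List.pairwise_cons.mp hs).2
                (fun f hf => hd f (by simp [hf])) hK' hbal'
                (fun f hf => hL f (by simp [hf])) (fun f hf => hB f (by simp [hf]))
                (fun _ => rfl)]
            congr 2
            congr 1
            ext y
            simp only [Finset.mem_filter, Finset.mem_Icc, pvPsum_cons]
            constructor
            · rintro ⟨⟨h1, h2⟩, hp⟩
              refine ⟨⟨h1, h2⟩, ?_⟩
              by_cases hxy : x ≤ y
              · rw [if_pos hxy]
                omega
              · rw [if_neg hxy, hps0 y (by omega)]
                omega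
            · rintro ⟨⟨h1, h2⟩, hp⟩
              refine ⟨⟨h1, h2⟩, ?_⟩
              by_cases hxy : x ≤ y
              · rw [if_pos hxy] at hp
                omega
              · rw [hps0 y (by omega)]
                omega
lemma pvEv_mem (spans : List (Int × Int)) (e : Int × Int) (he : e ∈ spans.flatMap pvEv) :
    ∃ p ∈ spans, e = (p.1, 1) ∨ e = (p.2 + 1, -1) := by
  rw [List.mem_flatMap] at he
  obtain ⟨p, hp, he⟩ := he
  refine ⟨p, hp, ?_⟩
  simp only [pvEv, List.mem_cons, List.mem_singleton] at he
  tauto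

lemma pvFlatSum (spans : List (Int × Int)) :
    ((spans.flatMap pvEv).map Prod.snd).sum = 0 := by
  induction spans with
  | nil => rfl
  | cons p l ih => simp [pvEv, ih]

lemma pvKflat (spans : List (Int × Int)) (hle : ∀ p ∈ spans, p.1 ≤ p.2) :
    pvK (spans.flatMap pvEv) 0 := by
  induction spans with
  | nil => intro y; simp
  | cons p l ih =>
      intro y
      have hp : p.1 ≤ p.2 := hle p (by simp)
      have h := ih (fun q hq => hle q (by simp [hq])) y
      have hexp : (p :: l).flatMap pvEv = (p.1, 1) :: (p.2 + 1, -1) :: l.flatMap pvEv := by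
        rw [List.flatMap_cons]; rfl
      simp only [hexp, List.countP_cons, Bool.and_eq_true, decide_eq_true_eq,
        and_true, if_false, if_true]
      split_ifs <;> push_cast at h ⊢ <;>
        first
        | exact absurd ‹_ ∧ False› (by simp)
        | omega

lemma pvK_perm (E F : List (Int × Int)) (a : Int) (hperm : E.Perm F) (hK : pvK F a) :
    pvK E a := by
  intro y
  rw [hperm.countP_eq, hperm.countP_eq]
  exact hK y

lemma pvPsum_perm (E F : List (Int × Int)) (y : Int) (hperm : E.Perm F) :
    pvPsum E y = pvPsum F y :=
  ((hperm.filter _).map Prod.snd).sum_eq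

lemma pvPsumFlat (spans : List (Int × Int)) (y : Int) (hle : ∀ p ∈ spans, p.1 ≤ p.2) :
    pvPsum (spans.flatMap pvEv) y
      = (spans.countP (fun p => decide (p.1 ≤ y) && decide (y ≤ p.2)) : Int) := by
  induction spans with
  | nil => rfl
  | cons p l ih =>
      have hp : p.1 ≤ p.2 := hle p (by simp)
      simp only [List.flatMap_cons, pvEv, List.cons_append, List.nil_append, List.countP_cons,
        pvPsum_cons, ih (fun q hq => hle q (by simp [hq]))]
      simp only [Bool.and_eq_true, decide_eq_true_eq]
      by_cases h1 : p.1 ≤ y <;> by_cases h2 : p.2 + 1 ≤ y <;>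
        simp [h1, h2, show (y ≤ p.2) ↔ ¬(p.2 + 1 ≤ y) by omega] <;> push_cast <;> omega

lemma pvBounds (l : List (Int × Int)) : ∃ L B : Int, ∀ p ∈ l, L ≤ p.1 ∧ p.2 ≤ B := by
  induction l with
  | nil => exact ⟨0, 0, by simp⟩
  | cons p l ih =>
      obtain ⟨L, B, h⟩ := ih
      refine ⟨min L p.1, max B p.2, ?_⟩
      intro q hq
      rcases List.mem_cons.mp hq with rfl | hq
      · omega
      · have := h q hq; omega

-- the sweep over the sorted events of a span list counts the covered cells
lemma pvSweepCard (spans : List (Int × Int)) (hle : ∀ p ∈ spans, p.1 ≤ p.2) :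
    ((PySem.List.sorted2 (spans.flatMap pvEv) (fun e => e.1) (fun e => e.2) false).foldl
        pvStep ((0 : Int), (0 : Int), (0 : Int))).2.2
      = ((pvCov spans).card : Int) := by
  obtain ⟨L, B, hLB⟩ := pvBounds spans
  have hperm := PySem.List.sorted2_perm (spans.flatMap pvEv) (fun e => e.1) (fun e => e.2) false
  set E := PySem.List.sorted2 (spans.flatMap pvEv) (fun e => e.1) (fun e => e.2) false with hE
  have hmemE : ∀ e ∈ E, ∃ p ∈ spans, e = (p.1, 1) ∨ e = (p.2 + 1, -1) := by
    intro e he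
    exact pvEv_mem spans e (hperm.mem_iff.mp he)
  rw [pvSweep E 0 0 0 L B (pvSorted2_pairwise_lex _)
      (by
        intro e he
        obtain ⟨p, _, h⟩ := hmemE e he
        rcases h with rfl | rfl
        · exact Or.inl rfl
        · exact Or.inr rfl)
      (pvK_perm E _ 0 hperm (pvKflat spans hle))
      (by rw [zero_add, (hperm.map Prod.snd).sum_eq, pvFlatSum])
      (by
        intro e he
        obtain ⟨p, hp, h⟩ := hmemE e he
        have h1 := (hLB p hp).1
        have h2 := hle p hp
        rcases h with rfl | rfl <;> simp <;> omega)
      (by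
        intro e he
        obtain ⟨p, hp, h⟩ := hmemE e he
        have h1 := (hLB p hp).2
        have h2 := hle p hp
        rcases h with rfl | rfl <;> simp <;> omega)
      (by omega)]
  rw [zero_add]
  congr 1
  congr 1
  congr 1
  ext y
  simp only [Finset.mem_filter, Finset.mem_Icc, pvCov_mem]
  rw [show (0 : Int) + pvPsum E y = pvPsum E y by omega,
      pvPsum_perm E _ y hperm, pvPsumFlat spans y hle]
  constructor
  · rintro ⟨⟨h1, h2⟩, hp⟩
    have : 0 < spans.countP (fun p => decide (p.1 ≤ y) && decide (y ≤ p.2)) := by omega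
    obtain ⟨p, hp', hcov⟩ := List.countP_pos_iff.mp this
    simp only [Bool.and_eq_true, decide_eq_true_eq] at hcov
    exact ⟨p, hp', hcov.1, hcov.2⟩
  · rintro ⟨p, hp, h1, h2⟩
    have hb := hLB p hp
    refine ⟨⟨by omega, by omega⟩, ?_⟩
    have : 0 < spans.countP (fun p => decide (p.1 ≤ y) && decide (y ≤ p.2)) :=
      List.countP_pos_iff.mpr ⟨p, hp, by simp only [Bool.and_eq_true, decide_eq_true_eq]; exact ⟨h1, h2⟩⟩
    omega

-- B computes the covered cardinality minus the beacon count
lemma pvB_card (values : List (Int × Int × Int × Int)) (ty : Int) :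
    solve_1_interval_merge_alt values ty
      = ((pvCov (values.filterMap (pvSpan ty))).card : Int)
        - ((values.foldl (pvBStep ty) []).length : Int) := by
  unfold solve_1_interval_merge_alt
  rw [pvFoldB ty values [] []]
  simp only [List.nil_append]
  show ((PySem.List.sorted2 ((values.filterMap (pvSpan ty)).flatMap pvEv)
          (fun e => e.1) (fun e => e.2) false).foldl pvStep ((0 : Int), (0 : Int), (0 : Int))).2.2
        - ((values.foldl (pvBStep ty) []).length : Int) = _
  rw [pvSweepCard (values.filterMap (pvSpan ty))
      (by
        intro p hp
        obtain ⟨v, _, hv⟩ := List.mem_filterMap.mp hp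
        exact pvSpanNonempty ty v p hv)]

-- ===== VERDICT =====
theorem solve_1_interval_merge_spec : Claim_equal_solve_1_interval_merge := by
  intro values ty _ hpre
  unfold Spec_solve_1_interval_merge
  rw [pvB_card]
  unfold solve_1_interval_merge
  rw [pvFoldA ty values [] []]
  simp only [List.nil_append]
  cases values with
  | nil =>
      simp [union_many_intervals, pvCov]
  | cons v vs =>
    have hex : ∃ w ∈ v :: vs, |w.2.1 - ty| ≤ |w.1 - w.2.2.1| + |w.2.1 - w.2.2.2| := by
      rcases hpre with h | h
      · cases h
      · exact h
    have hspanle : ∀ p ∈ (v :: vs).filterMap (pvSpan ty), p.1 ≤ p.2 := by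
      intro p hp
      obtain ⟨u, _, hu⟩ := List.mem_filterMap.mp hp
      exact pvSpanNonempty ty u p hu
    have hsne : (v :: vs).filterMap (pvSpan ty) ≠ [] := by
      obtain ⟨w, hw, hwle⟩ := hex
      intro hnil
      rcases ho : pvSpan ty w with _ | p
      · simp only [pvSpan] at ho
        rw [if_pos (by omega)] at ho
        cases ho
      · have : p ∈ (v :: vs).filterMap (pvSpan ty) := List.mem_filterMap.mpr ⟨w, hw, ho⟩
        rw [hnil] at this
        cases this
    cases vs with
    | nil =>
        -- a single sensor: A returns its (nonempty, by Pre_) interval unmerged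
        obtain ⟨w, hw, hwle⟩ := hex
        have hw' : w = v := by simpa using hw
        subst hw'
        rcases ho : pvSpan ty w with _ | p
        · simp only [pvSpan] at ho
          rw [if_pos (by omega)] at ho
          cases ho
        · have hhr : pvHr ty w = [p.1, p.2] := by rw [pvHr_eq, ho]; rfl
          have hple : p.1 ≤ p.2 := pvSpanNonempty ty w p ho
          simp only [List.map_cons, List.map_nil, List.filterMap_cons, List.filterMap_nil, ho]
          rw [hhr]
          simp only [union_many_intervals, List.length_cons, List.length_nil]
          rw [if_pos (by simp)]
          simp only [pvCov_cons, pvCov_nil, Finset.union_empty]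
          simp only [List.foldl_cons, List.foldl_nil, pvGet0, pvGet1]
          rw [Int.card_Icc]
          omega
    | cons w ws =>
        set spans0 : List (Int × Int) := (v :: w :: ws).filterMap (pvSpan ty) with hspans0
        have hqs' := pvSorted2_pairwise_fst spans0
        have hperm := PySem.List.sorted2_perm spans0 (fun p => p.1) (fun p => p.2) false
        obtain ⟨q, qs, hqq⟩ :
            ∃ q qs, PySem.List.sorted2 spans0 (fun p => p.1) (fun p => p.2) false = q :: qs := by
          cases h : PySem.List.sorted2 spans0 (fun p => p.1) (fun p => p.2) false with
          | nil =>
              exfalso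
              rw [h] at hperm
              exact hsne (List.Perm.nil_eq hperm).symm
          | cons q qs => exact ⟨q, qs, rfl⟩
        have hmemq : ∀ x ∈ q :: qs, x.1 ≤ x.2 := by
          intro x hx
          rw [← hqq] at hx
          exact hspanle x (hperm.mem_iff.mp hx)
        have hq12 : q.1 ≤ q.2 := hmemq q (by simp)
        have hqs : ∀ x ∈ qs, x.1 ≤ x.2 := fun x hx => hmemq x (by simp [hx])
        -- A's union pipeline
        have hunion : union_many_intervals ((v :: w :: ws).map (pvHr ty))
            = (qs.map pvToL).foldl pvMStep [[q.1, q.2]] := by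
          rw [pvUnion_ge2 _ (by simp)]
          rw [pvFilterMapEq, ← hspans0, pvSorted_map, pvSecondSort, hqq]
          simp only [List.map_cons]
          rfl
        rw [hunion, pvSumFold]
        have hmerge := pvMergeSum qs [] q.1 q.2 hqs
        simp only [List.map_nil, List.sum_nil, List.nil_append] at hmerge
        rw [hmerge]
        -- the merged lengths sum to the covered cardinality (frontier fold)
        have hfront := pvFrontCard q qs hmemq (by rw [← hqq]; exact hqs')
        obtain ⟨q1, q2⟩ := q
        simp only [List.foldl_cons] at hfront
        have hini : pvFStep (q1, 0) (q1, q2) = (q2 + 1, q2 + 1 - q1) := by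
          simp only [pvFStep, Prod.mk.injEq]
          simp only at hq12
          omega
        rw [hini, pvShift qs (q2 + 1) (q2 + 1 - q1)] at hfront
        rw [← pvCov_perm _ _ (hqq ▸ hperm), ← hfront]
        simp only at hq12
        simp only [show ((q1, q2) : Int × Int).2 = q2 from rfl,
          show ((q1, q2) : Int × Int).1 = q1 from rfl]
        omega
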